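-- pv_equiv track=rewrite | github.com/DodoDodoDodoDodo/TTRPGtools | ttrpgtools/book_import.py | _extract_rank_from_context
-- ===== SOURCE A (Python) =====
-- from typing import Callable, Iterable, List, Sequence
--
-- def _extract_rank_from_context(lines: Sequence[str], start: int) -> str | None:
--     """Extract rank name from section headers like 'ARCHIVIST\\nADVANCES'."""
--     # Look backwards for a rank name (all caps line followed by ADVANCES)
--     for i in range(start - 1, max(0, start - 20), -1):
--         line = lines[i].strip()
--         if not line:
--             continue
--         # Check if this is an all-caps word (potential rank name)
--         if line.isupper() and len(line) > 2 and line.isalpha():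
--             # Check if next non-empty line is "ADVANCES"
--             for j in range(i + 1, min(len(lines), i + 5)):
--                 next_line = lines[j].strip()
--                 if not next_line:
--                     continue
--                 if next_line.upper() == "ADVANCES":
--                     return line.title()
--                 break
--     return None
-- ===== SOURCE B (Python) =====
-- # Alternative decomposition: instead of A's backward scan with a nested
-- # lookahead loop per candidate, precompute a next-nonempty-line index map in
-- # ONE backward DP pass (nni[i] = index of first non-empty line after i), then
-- # select the answer declaratively with next() over the window.
--
-- def _extract_rank_from_context(lines, start):
--     lo = max(0, start - 20)
--     hi = min(len(lines) - 1, start + 3)  # last index ever inspected as a successor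
--     # DP: nni[i] = smallest j > i (j <= hi) with lines[j].strip() non-empty, else None
--     nni = {}
--     nxt = None
--     for i in range(hi, lo, -1):
--         nni[i] = nxt
--         if lines[i].strip():
--             nxt = i
--
--     def good(i):
--         s = lines[i].strip()
--         j = nni[i]
--         return (s.isupper() and len(s) > 2 and s.isalpha()
--                 and j is not None and j <= i + 4
--                 and lines[j].strip().upper() == "ADVANCES")
--
--     return next((lines[i].strip().title() for i in range(start - 1, lo, -1) if good(i)),
--                 None)
-- ===== Notes on version B (the rewrite author's own statement) =====
-- stated objective: alternative
-- what changed: A scans backwards and, per candidate header, runs a nested lookahead loop for the next non-empty line; B first builds a next-nonempty-index map in one backward DP pass (eliminating the per-candidate inner scan), then selects the answer declaratively with next() over the window using that map.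
import Mathlib
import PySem

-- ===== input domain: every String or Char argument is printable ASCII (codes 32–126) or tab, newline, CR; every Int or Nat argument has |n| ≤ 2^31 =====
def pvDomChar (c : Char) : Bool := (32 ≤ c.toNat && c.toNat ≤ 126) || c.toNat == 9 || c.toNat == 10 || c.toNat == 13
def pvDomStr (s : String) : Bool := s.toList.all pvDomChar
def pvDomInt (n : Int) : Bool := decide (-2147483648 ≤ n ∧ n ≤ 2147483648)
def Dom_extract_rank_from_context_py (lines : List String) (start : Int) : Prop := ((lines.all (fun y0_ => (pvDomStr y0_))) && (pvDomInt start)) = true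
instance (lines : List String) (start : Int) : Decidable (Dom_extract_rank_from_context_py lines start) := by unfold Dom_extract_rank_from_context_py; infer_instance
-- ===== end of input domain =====

-- B replaces A's backward scan with a nested per-candidate lookahead loop by: one backward DP
-- pass building a next-nonempty-index map, then a declarative next() selection over the window
-- (objective: alternative decomposition, same cost).

-- shared ports of Python str builtins not in PySem (exact on the ASCII domain):
-- str.isupper(): some cased character, and no lower-case cased character (ASCII cased = letters)
def pyIsUpper (s : String) : Bool :=
  s.toList.any (fun c => PySem.Chars.isalpha c) && s.toList.all (fun c => !(PySem.Chars.islower c))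

-- str.title(): a letter after a non-letter is uppercased, a letter after a letter lowercased
def pyTitleGo (prev : Bool) : List Char → List Char
  | [] => []
  | c :: cs =>
    if PySem.Chars.isalpha c then
      (if prev then PySem.Chars.lowerChar c else PySem.Chars.upperChar c) :: pyTitleGo true cs
    else c :: pyTitleGo false cs

def pyTitle (s : String) : String := String.ofList (pyTitleGo false s.toList)

-- ===== PORT A =====
-- inner loop: 'for j in range(i+1, min(len(lines), i+5)): … if not next_line: continue; if …=="ADVANCES": return …; break'
def pvInnerA (lines : List String) : List Int → Bool
  | [] => false
  | j :: rest =>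
    match PySem.List.pyGet? lines j with
    | none => false
    | some s =>
      let next_line := PySem.Str.strip s
      if next_line = "" then pvInnerA lines rest
      else decide (PySem.Str.upper next_line = "ADVANCES")

-- outer loop: 'for i in range(start-1, max(0, start-20), -1): …' (pyGet? none = IndexError, excluded by Pre_)
def pvLoopA (lines : List String) : List Int → Option String
  | [] => none
  | i :: rest =>
    match PySem.List.pyGet? lines i with
    | none => none
    | some s =>
      let line := PySem.Str.strip s
      if line = "" then pvLoopA lines rest
      else if pyIsUpper line && decide (2 < PySem.Str.len line) && PySem.Str.strIsalpha line then
        if pvInnerA lines (PySem.List.pyRange (i + 1) (min (lines.length : Int) (i + 5)) 1) then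
          some (pyTitle line)
        else pvLoopA lines rest
      else pvLoopA lines rest

def extract_rank_from_context_py (lines : List String) (start : Int) : Option String :=
  pvLoopA lines (PySem.List.pyRange (start - 1) (max 0 (start - 20)) (-1))

-- ===== PORT B =====
-- one iteration of B's DP loop 'for i in range(hi, lo, -1): nni[i] = nxt; if lines[i].strip(): nxt = i'
-- (every i of this loop satisfies 0 ≤ lo < i ≤ hi < len(lines), so lines[i] never raises: pyGetD is exact here)
def pvNniStep (lines : List String) (st : PySem.Dict Int (Option Int) × Option Int) (i : Int) :
    PySem.Dict Int (Option Int) × Option Int :=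
  (st.1.insert i st.2,
   if PySem.Str.strip (PySem.List.pyGetD lines i "") ≠ "" then some i else st.2)

-- the DP map: nni[i] = index of first non-empty line after i (within (i, hi]), else None
def pvNniB (lines : List String) (lo hi : Int) : PySem.Dict Int (Option Int) :=
  ((PySem.List.pyRange hi lo (-1)).foldl (pvNniStep lines) (PySem.Dict.empty, none)).1

-- 'good(i)' (outer i has 0 ≤ i < len(lines) and a key of nni under Pre_, so pyGetD/getD are exact)
def pvGoodB (lines : List String) (nni : PySem.Dict Int (Option Int)) (i : Int) : Bool :=
  let s := PySem.Str.strip (PySem.List.pyGetD lines i "")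
  let j? := nni.getD i none
  pyIsUpper s && decide (2 < PySem.Str.len s) && PySem.Str.strIsalpha s &&
    (match j? with
     | none => false
     | some j =>
        decide (j ≤ i + 4) &&
        decide (PySem.Str.upper (PySem.Str.strip (PySem.List.pyGetD lines j "")) = "ADVANCES"))

-- 'next((lines[i].strip().title() for i in range(start-1, lo, -1) if good(i)), None)'
def extract_rank_from_context_py_alt (lines : List String) (start : Int) : Option String :=
  let lo := max 0 (start - 20)
  let hi := min ((lines.length : Int) - 1) (start + 3)
  let nni := pvNniB lines lo hi
  (PySem.List.pyRange (start - 1) lo (-1)).findSome?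
    (fun i => if pvGoodB lines nni i then some (pyTitle (PySem.Str.strip (PySem.List.pyGetD lines i ""))) else none)

-- ===== PRECONDITION & SPEC =====
-- Pre_ excludes exactly the inputs where Python A raises IndexError: a non-empty scan range
-- starting at index start-1 ≥ len(lines) (i.e. start > len(lines) with start ≥ 2).
def Pre_extract_rank_from_context_py (lines : List String) (start : Int) : Prop :=
  start ≤ (lines.length : Int) ∨ start ≤ 1
instance (lines : List String) (start : Int) : Decidable (Pre_extract_rank_from_context_py lines start) := by unfold Pre_extract_rank_from_context_py; infer_instance

def pvWitness_extract_rank_from_context_py : List String × Int :=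
  (["ZEALOT", "ADVANCES", "x"], 2)

def Spec_extract_rank_from_context_py (lines : List String) (start : Int) (out : Option String) : Prop := out = extract_rank_from_context_py_alt lines start
instance (lines : List String) (start : Int) (out : Option String) : Decidable (Spec_extract_rank_from_context_py lines start out) := by unfold Spec_extract_rank_from_context_py; infer_instance

-- ===== CLAIM (what is proved, stated in full; the proofs are below) =====
def Claim_equal_extract_rank_from_context_py : Prop := ∀ (lines : List String) (start : Int), Dom_extract_rank_from_context_py lines start → Pre_extract_rank_from_context_py lines start → Spec_extract_rank_from_context_py lines start (extract_rank_from_context_py lines start)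

-- ===== LEMMAS AND PROOFS =====

-- proof-side helpers --------------------------------------------------------

-- first non-empty stripped line among an index list (A's inner break-loop, value form)
def pvNextNonemptyA (lines : List String) : List Int → Option String
  | [] => none
  | j :: rest =>
    match PySem.List.pyGet? lines j with
    | none => none
    | some s =>
      let t := PySem.Str.strip s
      if t = "" then pvNextNonemptyA lines rest else some t

-- A's per-index contribution: some title on a hit, none otherwise
def pvHitA (lines : List String) (i : Int) : Option String :=
  match PySem.List.pyGet? lines i with
  | none => none
  | some s =>
    let line := PySem.Str.strip s
    if pyIsUpper line && decide (2 < PySem.Str.len line) && PySem.Str.strIsalpha line then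
      if pvInnerA lines (PySem.List.pyRange (i + 1) (min (lines.length : Int) (i + 5)) 1) then
        some (pyTitle line)
      else none
    else none

-- index of the first non-empty line in (i, hi], as B's DP computes it
def pvFNE (lines : List String) (i hi : Int) : Option Int :=
  (PySem.List.pyRange (i + 1) (hi + 1) 1).findSome?
    (fun j => if PySem.Str.strip (PySem.List.pyGetD lines j "") = "" then none else some j)

-- pvFNE with a fallback (the DP's running 'nxt' below the processed suffix)
def pvF (lines : List String) (i hi : Int) (nxt0 : Option Int) : Option Int :=
  match pvFNE lines i hi with
  | some j => some j
  | none => nxt0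

theorem pvF_none (lines : List String) (i hi : Int) : pvF lines i hi none = pvFNE lines i hi := by
  unfold pvF; cases pvFNE lines i hi <;> rfl

theorem pvFNE_self (lines : List String) (hi : Int) : pvFNE lines hi hi = none := by
  unfold pvFNE
  rw [PySem.List.pyRange_one_eq_nil (by omega)]
  rfl

theorem pvFNE_cons (lines : List String) (i hi : Int) (h : i < hi) :
    pvFNE lines i hi =
      (if PySem.Str.strip (PySem.List.pyGetD lines (i + 1) "") = ""
       then pvFNE lines (i + 1) hi else some (i + 1)) := by
  unfold pvFNE
  rw [PySem.List.pyRange_one_cons (by omega : i + 1 < hi + 1)]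
  rw [List.findSome?_cons]
  split_ifs with h1 <;> simp

-- basic facts ---------------------------------------------------------------

theorem pvPyGet?_some (lines : List String) (i : Int) (h0 : 0 ≤ i) (hl : i < (lines.length : Int)) :
    PySem.List.pyGet? lines i = some (PySem.List.pyGetD lines i "") := by
  rw [PySem.List.pyGet?_eq_some_getElem lines h0 hl, PySem.List.pyGetD_eq_getElem lines "" h0 hl]

theorem pvIsHeader_empty : (pyIsUpper "" && decide (2 < PySem.Str.len "") && PySem.Str.strIsalpha "") = false := by
  decide

-- A's inner break-loop computes the ADVANCES test on the first non-empty successor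
theorem pvInnerA_eq (lines : List String) (jr : List Int) :
    pvInnerA lines jr =
      (match pvNextNonemptyA lines jr with
       | some nxt => decide (PySem.Str.upper nxt = "ADVANCES")
       | none => false) := by
  induction jr with
  | nil => rfl
  | cons j rest ih =>
    simp only [pvInnerA, pvNextNonemptyA]
    cases PySem.List.pyGet? lines j with
    | none => rfl
    | some s =>
      by_cases h : PySem.Str.strip s = "" <;> simp [h, ih]

-- A's inner loop as the index-level first-non-empty search
theorem pvNextNonemptyA_eq (lines : List String) (l : List Int)
    (hb : ∀ j ∈ l, 0 ≤ j ∧ j < (lines.length : Int)) :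
    pvNextNonemptyA lines l =
      (l.findSome? (fun j => if PySem.Str.strip (PySem.List.pyGetD lines j "") = "" then none else some j)).map
        (fun j => PySem.Str.strip (PySem.List.pyGetD lines j "")) := by
  induction l with
  | nil => rfl
  | cons j rest ih =>
    have hj := hb j (by simp)
    have hrest : ∀ j ∈ rest, 0 ≤ j ∧ j < (lines.length : Int) := fun x hx => hb x (by simp [hx])
    simp only [pvNextNonemptyA, List.findSome?_cons, pvPyGet?_some lines j hj.1 hj.2]
    by_cases h : PySem.Str.strip (PySem.List.pyGetD lines j "") = "" <;> simp [h, ih hrest]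

-- A's backward loop is the first hit over its index list, provided every index is in bounds
theorem pvLoopA_eq (lines : List String) (l : List Int)
    (hb : ∀ i ∈ l, PySem.List.pyGet? lines i ≠ none) :
    pvLoopA lines l = l.findSome? (pvHitA lines) := by
  induction l with
  | nil => rfl
  | cons i rest ih =>
    have hbr : ∀ j ∈ rest, PySem.List.pyGet? lines j ≠ none := fun j hj => hb j (by simp [hj])
    have hi := hb i (by simp)
    rw [List.findSome?_cons]
    cases hg : PySem.List.pyGet? lines i with
    | none => exact absurd hg hi
    | some s =>
      simp only [pvHitA, pvLoopA, hg]
      by_cases h0 : PySem.Str.strip s = ""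
      · rw [h0]
        simp only [pvIsHeader_empty, Bool.false_eq_true, if_false, if_true]
        exact ih hbr
      · simp only [h0, if_false]
        by_cases hh : (pyIsUpper (PySem.Str.strip s) && decide (2 < PySem.Str.len (PySem.Str.strip s))
            && PySem.Str.strIsalpha (PySem.Str.strip s)) = true
        · simp only [hh, if_true]
          by_cases hin : pvInnerA lines (PySem.List.pyRange (i + 1) (min (lines.length : Int) (i + 5)) 1) = true
          · simp [hin]
          · simp only [Bool.not_eq_true] at hin
            simp [hin, ih hbr]
        · simp only [Bool.not_eq_true] at hh
          simp only [hh, Bool.false_eq_true, if_false]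
          exact ih hbr

-- characterization of B's DP fold (generalized over the initial state)
theorem pvNniFoldr_spec (lines : List String) (hi : Int) :
    ∀ (n : Nat) (lo : Int), hi = lo + n →
    ∀ (d0 : PySem.Dict Int (Option Int)) (nxt0 : Option Int),
      (((PySem.List.pyRange (lo + 1) (hi + 1) 1).foldr (fun i st => pvNniStep lines st i) (d0, nxt0)).2
          = pvF lines lo hi nxt0)
      ∧ ∀ (k : Int),
        ((PySem.List.pyRange (lo + 1) (hi + 1) 1).foldr (fun i st => pvNniStep lines st i) (d0, nxt0)).1.get? k
          = if lo < k ∧ k ≤ hi then some (pvF lines k hi nxt0) else d0.get? k := by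
  intro n
  induction n with
  | zero =>
    intro lo hlo d0 nxt0
    have he : lo = hi := by omega
    subst he
    rw [PySem.List.pyRange_one_eq_nil (by omega)]
    refine ⟨?_, ?_⟩
    · simp [pvF, pvFNE_self]
    · intro k
      rw [if_neg (by omega)]
      rfl
  | succ n ih =>
    intro lo hlo d0 nxt0
    have hlt : lo < hi := by omega
    rw [PySem.List.pyRange_one_cons (by omega : lo + 1 < hi + 1), List.foldr_cons]
    obtain ⟨ih2, ih1⟩ := ih (lo + 1) (by omega) d0 nxt0
    refine ⟨?_, ?_⟩
    · show (if PySem.Str.strip (PySem.List.pyGetD lines (lo + 1) "") ≠ "" then some (lo + 1)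
            else ((PySem.List.pyRange (lo + 1 + 1) (hi + 1) 1).foldr (fun i st => pvNniStep lines st i) (d0, nxt0)).2)
          = pvF lines lo hi nxt0
      rw [ih2]
      unfold pvF
      rw [pvFNE_cons lines lo hi hlt]
      by_cases h : PySem.Str.strip (PySem.List.pyGetD lines (lo + 1) "") = "" <;> simp [h]
    · intro k
      show (((PySem.List.pyRange (lo + 1 + 1) (hi + 1) 1).foldr (fun i st => pvNniStep lines st i) (d0, nxt0)).1.insert (lo + 1)
              ((PySem.List.pyRange (lo + 1 + 1) (hi + 1) 1).foldr (fun i st => pvNniStep lines st i) (d0, nxt0)).2).get? k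
            = if lo < k ∧ k ≤ hi then some (pvF lines k hi nxt0) else d0.get? k
      rw [PySem.Dict.get?_insert, ih2, ih1 k]
      by_cases hk : k = lo + 1
      · subst hk
        rw [if_pos rfl, if_pos (by omega)]
      · rw [if_neg hk]
        by_cases hk2 : lo + 1 < k ∧ k ≤ hi
        · rw [if_pos hk2, if_pos (by omega)]
        · rw [if_neg hk2, if_neg (by omega)]

-- the DP map looked up at an in-range key is the first-non-empty index
theorem pvNniB_getD (lines : List String) (lo hi i : Int) (h1 : lo < i) (h2 : i ≤ hi) :
    (pvNniB lines lo hi).getD i none = pvFNE lines i hi := by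
  unfold pvNniB
  rw [PySem.List.pyRange_neg_one_eq_reverse, List.foldl_reverse]
  obtain ⟨_, hspec⟩ := pvNniFoldr_spec lines hi (hi - lo).toNat lo (by omega) PySem.Dict.empty none
  rw [PySem.Dict.getD_eq_get?_getD, hspec i, if_pos ⟨h1, h2⟩]
  simp [pvF_none]

theorem pvFindSome?_congr {α β : Type} (f g : α → Option β) (l : List α)
    (h : ∀ a ∈ l, f a = g a) : l.findSome? f = l.findSome? g := by
  induction l with
  | nil => rfl
  | cons a l ih =>
    rw [List.findSome?_cons, List.findSome?_cons, h a (by simp)]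
    cases g a with
    | some b => rfl
    | none => exact ih (fun x hx => h x (by simp [hx]))

set_option maxHeartbeats 1600000 in
-- per-index agreement: B's good-test/title equals A's per-index contribution
theorem pvHit_eq_good (lines : List String) (start i : Int)
    (hstart : start ≤ (lines.length : Int))
    (hlo : max 0 (start - 20) < i) (hi_lt : i < start) :
    (if pvGoodB lines (pvNniB lines (max 0 (start - 20)) (min ((lines.length : Int) - 1) (start + 3))) i
     then some (pyTitle (PySem.Str.strip (PySem.List.pyGetD lines i ""))) else none)
    = pvHitA lines i := by
  have h0i : 0 ≤ i := by omega
  have hilen : i < (lines.length : Int) := by omega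
  have hihi : i ≤ min ((lines.length : Int) - 1) (start + 3) := by omega
  have hc1 : i + 1 ≤ min ((lines.length : Int)) (i + 5) := by omega
  have hc2 : min ((lines.length : Int)) (i + 5) ≤ min ((lines.length : Int) - 1) (start + 3) + 1 := by omega
  have hbnd : ∀ j ∈ PySem.List.pyRange (i + 1) (min ((lines.length : Int)) (i + 5)) 1,
      0 ≤ j ∧ j < (lines.length : Int) := by
    intro j hj
    rw [PySem.List.mem_pyRange_one] at hj
    omega
  simp only [pvHitA, pvGoodB, pvPyGet?_some lines i h0i hilen,
    pvNniB_getD lines _ _ i hlo hihi, pvInnerA_eq, pvNextNonemptyA_eq lines _ hbnd, pvFNE,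
    PySem.List.pyRange_one_append (i + 1) (min ((lines.length : Int)) (i + 5))
      (min ((lines.length : Int) - 1) (start + 3) + 1) hc1 hc2,
    List.findSome?_append]
  cases hF1 : (PySem.List.pyRange (i + 1) (min ((lines.length : Int)) (i + 5)) 1).findSome?
      (fun j => if PySem.Str.strip (PySem.List.pyGetD lines j "") = "" then none else some j) with
  | some j1 =>
    have hj1 : j1 ∈ PySem.List.pyRange (i + 1) (min ((lines.length : Int)) (i + 5)) 1 := by
      obtain ⟨a, ha, hfa⟩ := List.exists_of_findSome?_eq_some hF1
      by_cases h : PySem.Str.strip (PySem.List.pyGetD lines a "") = ""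
      · rw [if_pos h] at hfa; cases hfa
      · rw [if_neg h] at hfa
        cases hfa
        exact ha
    have hj1b : j1 ≤ i + 4 := by
      rw [PySem.List.mem_pyRange_one] at hj1
      omega
    by_cases hadv : PySem.Str.upper (PySem.Str.strip (PySem.List.pyGetD lines j1 "")) = "ADVANCES" <;>
      simp [hadv, hj1b]
  | none =>
    cases hF : (PySem.List.pyRange (min ((lines.length : Int)) (i + 5))
        (min ((lines.length : Int) - 1) (start + 3) + 1) 1).findSome?
          (fun j => if PySem.Str.strip (PySem.List.pyGetD lines j "") = "" then none else some j) with
    | none => simp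
    | some j2 =>
      have hj2 : ¬ (j2 ≤ i + 4) := by
        obtain ⟨a, ha, hfa⟩ := List.exists_of_findSome?_eq_some hF
        by_cases hx : PySem.Str.strip (PySem.List.pyGetD lines a "") = ""
        · rw [if_pos hx] at hfa; cases hfa
        · rw [if_neg hx] at hfa
          cases hfa
          rw [PySem.List.mem_pyRange_one] at ha
          omega
      simp [hj2]

-- ===== VERDICT (by name: the statement is the Claim_ definition above) =====
theorem extract_rank_from_context_py_spec : Claim_equal_extract_rank_from_context_py := by
  unfold Claim_equal_extract_rank_from_context_py
  intro lines start _ hpre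
  unfold Spec_extract_rank_from_context_py extract_rank_from_context_py extract_rank_from_context_py_alt
  rcases hpre with hle | h1
  · have hb : ∀ i ∈ PySem.List.pyRange (start - 1) (max 0 (start - 20)) (-1),
        PySem.List.pyGet? lines i ≠ none := by
      intro i hi
      rw [PySem.List.mem_pyRange_neg_one] at hi
      rw [pvPyGet?_some lines i (by omega) (by omega)]
      exact Option.some_ne_none _
    rw [pvLoopA_eq lines _ hb]
    refine (pvFindSome?_congr _ _ _ ?_).symm
    intro i hi
    rw [PySem.List.mem_pyRange_neg_one] at hi
    exact pvHit_eq_good lines start i hle (by omega) (by omega)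
  · have hnil : PySem.List.pyRange (start - 1) (max 0 (start - 20)) (-1) = [] :=
      PySem.List.pyRange_neg_one_eq_nil (by omega)
    simp only [hnil, List.findSome?_nil]
    rfl
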